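-- pv_equiv track=rewrite | github.com/sev17238/Disenio-de-lenguajes-programacion | functions.py | getRegExUniqueTokens
-- ===== SOURCE A (Python) =====
-- def getRegExUniqueTokens(postfix_regex):
--     '''
--     Funcion que obtiene los tokens unicos o el lenguaje de una expresion regular en formato postfix.
--     '''
--     ops = '*|.#'
--     tokens = []
--     for i in range(len(postfix_regex)):
--         token = postfix_regex[i]
--         op_exist = token in ops
--         if(op_exist == False):
--             tokens.append(token)
--
--     return list(dict.fromkeys(tokens))
-- ===== SOURCE B (Python) =====
-- def getRegExUniqueTokens(postfix_regex):
--     '''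
--     Stateless positional formulation: a character belongs to the output iff it
--     is not an operator and this position is its first occurrence in the string
--     (it does not appear in the preceding prefix).  No dedup pass, no seen-set.
--     '''
--     return [c for i, c in enumerate(postfix_regex)
--             if c not in '*|.#' and c not in postfix_regex[:i]]
-- ===== Notes on version B (the rewrite author's own statement) =====
-- stated objective: alternative
-- what changed: Replaced A's two passes (filter operators into a list, then dict.fromkeys dedup) by a single stateless comprehension that keeps a character iff it is not an operator and does not occur in the preceding prefix (first-occurrence positional test); no dedup structure is maintained, at the cost of a quadratic prefix scan.
import Mathlib
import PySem

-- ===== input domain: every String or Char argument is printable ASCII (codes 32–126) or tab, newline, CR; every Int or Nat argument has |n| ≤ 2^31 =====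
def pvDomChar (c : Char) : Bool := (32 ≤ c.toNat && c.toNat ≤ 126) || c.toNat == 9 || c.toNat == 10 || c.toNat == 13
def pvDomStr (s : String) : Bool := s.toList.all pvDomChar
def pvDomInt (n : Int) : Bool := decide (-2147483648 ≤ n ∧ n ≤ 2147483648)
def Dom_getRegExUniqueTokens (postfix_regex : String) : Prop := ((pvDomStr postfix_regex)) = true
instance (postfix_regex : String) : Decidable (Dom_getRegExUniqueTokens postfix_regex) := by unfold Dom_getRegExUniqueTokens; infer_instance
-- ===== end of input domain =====

-- B replaces A's filter-pass + dict.fromkeys dedup-pass by a stateless first-occurrence-in-prefix comprehension; objective: alternative.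


-- ===== PORT A =====
def getRegExUniqueTokens (postfix_regex : String) : List String :=
  let ops : String := "*|.#"
  let tokens : List String :=
    (PySem.List.pyRange 0 (PySem.Str.len postfix_regex) 1).foldl
      (fun tokens i =>
        let token : String := String.ofList [PySem.List.pyGetD postfix_regex.toList i ' ']
        let op_exist : Bool := PySem.Str.isIn token ops
        if op_exist == false then tokens ++ [token] else tokens)
      []
  PySem.List.dedup tokens

-- ===== PORT B =====
def getRegExUniqueTokens_alt (postfix_regex : String) : List String :=
  ((PySem.List.enumerate postfix_regex.toList 0).filter
      (fun q => !PySem.Str.isIn (String.ofList [q.2]) "*|.#" &&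
                !PySem.Str.isIn (String.ofList [q.2]) (PySem.Str.slice postfix_regex none (some q.1)))).map
    (fun q => String.ofList [q.2])

-- ===== PRECONDITION & SPEC =====
def Spec_getRegExUniqueTokens (postfix_regex : String) (out : List String) : Prop := out = getRegExUniqueTokens_alt postfix_regex
instance (postfix_regex : String) (out : List String) : Decidable (Spec_getRegExUniqueTokens postfix_regex out) := by unfold Spec_getRegExUniqueTokens; infer_instance

-- ===== CLAIM =====
def Claim_equal_getRegExUniqueTokens : Prop := ∀ (postfix_regex : String), Dom_getRegExUniqueTokens postfix_regex → Spec_getRegExUniqueTokens postfix_regex (getRegExUniqueTokens postfix_regex)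

-- ===== LEMMAS AND PROOFS =====

-- single-character substring membership is element membership
theorem pvIsIn_singleton (c : Char) (l : List Char) :
    PySem.Chars.isIn [c] l = decide (c ∈ l) := by
  by_cases h : c ∈ l
  · simp only [h, decide_true]
    exact (PySem.Chars.isIn_iff_infix _ _).mpr (by
      obtain ⟨s, t, rfl⟩ := List.append_of_mem h
      exact ⟨s, t, by simp⟩)
  · simp only [h, decide_false]
    exact (PySem.Chars.isIn_eq_false_iff _ _).mpr (fun hinf => h (hinf.mem (by simp)))

-- dedup of ys ++ [x] is Set.add of dedup ys
theorem pvDedup_snoc {α : Type} [BEq α] (ys : List α) (x : α) :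
    PySem.List.dedup (ys ++ [x]) = PySem.Set.add (PySem.List.dedup ys) x := by
  simp [PySem.List.dedup_eq_ofList, PySem.Set.ofList_eq_foldl, List.foldl_append]

-- dedup commutes with an injective map
theorem pvDedup_map (f : Char → String) (hf : Function.Injective f) (xs : List Char) :
    PySem.List.dedup (xs.map f) = (PySem.List.dedup xs).map f := by
  induction xs using List.reverseRecOn with
  | nil => simp [PySem.List.dedup_eq_ofList, PySem.Set.ofList_eq_foldl]
  | append_singleton ys x ih =>
    rw [List.map_append, List.map_singleton, pvDedup_snoc, pvDedup_snoc, ih]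
    by_cases h : x ∈ PySem.List.dedup ys
    · have h1 : f x ∈ (PySem.List.dedup ys).map f := List.mem_map_of_mem h
      simp only [PySem.Set.add, PySem.Set.contains, List.contains_eq_mem, h, h1,
        decide_true, if_true]
    · have h1 : f x ∉ (PySem.List.dedup ys).map f := by
        intro hm
        obtain ⟨y, hy, he⟩ := List.mem_map.mp hm
        exact h (hf he ▸ hy)
      simp only [PySem.Set.add, PySem.Set.contains, List.contains_eq_mem, h, h1,
        decide_false, if_false, List.map_append, List.map_singleton, Bool.false_eq_true]

-- core: ordered dedup of the filtered list = stateless first-occurrence filter over enumerate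
theorem pvCore (p : Char → Bool) (xs : List Char) :
    PySem.List.dedup (xs.filter p) =
      ((PySem.List.enumerate xs 0).filter
        (fun q => p q.2 && !decide (q.2 ∈ xs.take q.1.toNat))).map (·.2) := by
  induction xs using List.reverseRecOn with
  | nil => simp [PySem.List.dedup_eq_ofList, PySem.Set.ofList_eq_foldl,
      PySem.List.enumerate_nil]
  | append_singleton ys x ih =>
    have hcongr : (PySem.List.enumerate ys 0).filter
        (fun q => p q.2 && !decide (q.2 ∈ (ys ++ [x]).take q.1.toNat)) =
        (PySem.List.enumerate ys 0).filter
        (fun q => p q.2 && !decide (q.2 ∈ ys.take q.1.toNat)) := by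
      apply List.filter_congr
      intro q hq
      obtain ⟨k, hk, rfl⟩ := (PySem.List.mem_enumerate_iff _ _ _).mp hq
      have hT : ((0 : Int) + (k : Int)).toNat = k := by omega
      rw [hT, List.take_append_of_le_length (Nat.le_of_lt hk)]
    rw [PySem.List.enumerate_append, List.filter_append, List.filter_append, hcongr, List.map_append, ← ih]
    have hlast : PySem.List.enumerate [x] ((0 : Int) + (ys.length : Int)) =
        [((ys.length : Int), x)] := by
      simp [PySem.List.enumerate_cons, PySem.List.enumerate_nil]
    rw [hlast]
    have hT2 : ((ys.length : Int)).toNat = ys.length := by omega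
    cases px : p x with
    | false =>
      simp [px]
    | true =>
      have : List.filter p [x] = [x] := by simp [px]
      rw [this, pvDedup_snoc]
      by_cases hmem : x ∈ ys
      · have hc : (PySem.List.dedup (List.filter p ys)).contains x = true := by
          simp [List.contains_eq_mem, List.mem_filter, hmem, px]
        simp [PySem.Set.add, PySem.Set.contains, px, hT2, hmem]
      · have hc : (PySem.List.dedup (List.filter p ys)).contains x = false := by
          simp [List.contains_eq_mem, List.mem_filter, hmem]
        simp [PySem.Set.add, PySem.Set.contains, px, hT2, hmem]

-- the single-character string constructor is injective
theorem pvMk_inj : Function.Injective (fun c => String.ofList [c]) := by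
  intro a b h
  have := congrArg String.toList h
  simp only [String.toList_ofList] at this
  exact List.singleton_inj.mp this

-- ===== VERDICT =====
theorem getRegExUniqueTokens_spec : Claim_equal_getRegExUniqueTokens := by
  intro s _
  unfold Spec_getRegExUniqueTokens getRegExUniqueTokens getRegExUniqueTokens_alt
  simp only [PySem.Str.len_eq]
  have h2 := PySem.List.foldl_pyRange_pyGetD' s.toList ' '
      (fun acc c => if (PySem.Str.isIn (String.ofList [c]) "*|.#" == false) = true
                    then acc ++ [String.ofList [c]] else acc) [] (a := 0) (by omega)
  simp only [Int.toNat_zero, List.drop_zero] at h2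
  rw [h2]
  have hbeq : ∀ c : Char, ((PySem.Str.isIn (String.ofList [c]) "*|.#" == false) : Bool)
      = !PySem.Str.isIn (String.ofList [c]) "*|.#" := by
    intro c; cases PySem.Str.isIn (String.ofList [c]) "*|.#" <;> rfl
  simp only [hbeq]
  rw [PySem.List.foldl_append_if (fun c => !PySem.Str.isIn (String.ofList [c]) "*|.#")
        (fun c => String.ofList [c])]
  rw [List.nil_append, pvDedup_map _ pvMk_inj,
      pvCore (fun c => !PySem.Str.isIn (String.ofList [c]) "*|.#") s.toList, List.map_map]
  have hfc : (PySem.List.enumerate s.toList 0).filter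
      (fun q => !PySem.Str.isIn (String.ofList [q.2]) "*|.#" &&
                !PySem.Str.isIn (String.ofList [q.2]) (PySem.Str.slice s none (some q.1))) =
      (PySem.List.enumerate s.toList 0).filter
      (fun q => !PySem.Str.isIn (String.ofList [q.2]) "*|.#" &&
                !decide (q.2 ∈ s.toList.take q.1.toNat)) := by
    apply List.filter_congr
    intro q hq
    obtain ⟨k, hk, rfl⟩ := (PySem.List.mem_enumerate_iff _ _ _).mp hq
    have hslice : (PySem.Str.slice s none (some ((0 : Int) + (k : Int)))).toList =
        s.toList.take ((0 : Int) + (k : Int)).toNat := by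
      rw [PySem.Str.toList_slice, PySem.Chars.slice_eq_listSlice,
          PySem.List.slice_to (xs := s.toList) (b := (0 : Int) + (k : Int)) (by omega)]
    have : PySem.Str.isIn (String.ofList [s.toList[k]])
        (PySem.Str.slice s none (some ((0 : Int) + (k : Int)))) =
        decide (s.toList[k] ∈ s.toList.take ((0 : Int) + (k : Int)).toNat) := by
      rw [← pvIsIn_singleton, ← hslice]
      simp [PySem.Str.isIn_eq]
    simp only [this]
  rw [hfc]
  rfl
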